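-- pv_equiv track=rewrite | github.com/Yang-Xavier/NLP_Lab | lab4/lab4.py | viterbi_predict
-- ===== SOURCE A (Python) =====
-- def viterbi_predict(weight, sentence,  labels, keys):
--
--     current_pro = {}
--     path = dict((l, []) for l in labels)
--     for l in labels:
--         current_pro[l] =  weight[keys[sentence[0] + "_" + l]] if sentence[0] + "_" + l in keys else 0
--
--     for i in range(1, len(sentence)):
--         last_pro = current_pro
--         current_pro = {}
--         for l in labels:
--             pro, mxlabel =max( [( last_pro[la] + (weight[keys[sentence[i] + "_" + l]] if sentence[i] + "_" + l in keys else 0) , la ) for la in labels] , key= lambda x:x[0])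
--             current_pro[l] = pro
--             path[l].append(mxlabel)
--
--     max_pro = -1
--     max_path = None
--     for label in current_pro:
--         path[label].append(label)
--         if current_pro[label] > max_pro:
--             max_path = path[label]
--             max_pro = current_pro[label]
--
--
--     return max_path
-- ===== SOURCE B (Python) =====
-- def viterbi_predict(weight, sentence, labels, keys):
--     # Since the score added at step i for label l does not depend on the
--     # predecessor label, the best predecessor is a single argmax of the
--     # previous scores, computed once per step (not once per label).
--     def emit(word, l):
--         k = word + "_" + l
--         return weight[keys[k]] if k in keys else 0
--
--     current = {l: emit(sentence[0], l) for l in labels}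
--     path = {l: [] for l in labels}
--     for word in sentence[1:]:
--         best = max(labels, key=lambda la: current[la])
--         base = current[best]
--         current = {l: base + emit(word, l) for l in labels}
--         for l in labels:
--             path[l].append(best)
--     best = max(current, key=lambda l: current[l])
--     return path[best] + [best]
-- ===== Notes on version B (the rewrite author's own statement) =====
-- stated objective: faster
-- what changed: B hoists the predecessor argmax out of the per-label inner loop (the score added at each step is independent of the predecessor label), computing one argmax of the previous scores per step instead of an O(L) max inside every label, and picks the final best path with a direct max over the score dict instead of A's -1-sentinel scan.
-- outside the precondition, e.g. on viterbi_predict([-2, -3], ['a'], ['x', 'y'], {'a_x': 0, 'a_y': 1}): A returns None, B returns ['x']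
import Mathlib
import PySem

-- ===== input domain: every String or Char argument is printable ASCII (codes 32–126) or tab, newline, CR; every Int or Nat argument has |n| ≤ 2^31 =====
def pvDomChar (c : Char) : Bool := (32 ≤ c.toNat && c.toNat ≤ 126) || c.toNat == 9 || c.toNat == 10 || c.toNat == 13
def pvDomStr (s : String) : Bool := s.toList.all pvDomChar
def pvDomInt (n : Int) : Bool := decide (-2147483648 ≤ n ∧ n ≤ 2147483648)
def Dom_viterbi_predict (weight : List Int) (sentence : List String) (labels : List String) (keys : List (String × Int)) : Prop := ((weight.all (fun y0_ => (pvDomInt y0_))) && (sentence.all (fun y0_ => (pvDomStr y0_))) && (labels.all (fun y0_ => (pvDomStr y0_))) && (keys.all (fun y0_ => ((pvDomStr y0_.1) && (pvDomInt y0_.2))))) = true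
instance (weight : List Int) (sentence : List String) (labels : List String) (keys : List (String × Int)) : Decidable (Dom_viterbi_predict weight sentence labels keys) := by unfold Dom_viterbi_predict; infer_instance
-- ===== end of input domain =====

-- B hoists the predecessor argmax out of the per-label inner loop (the step score is
-- predecessor-independent), one argmax per step instead of one per label (faster per
-- a timing run), and picks the final best path by a direct max instead of A's
-- -1-sentinel scan.

-- ===== PORT A =====
-- `weight[keys[w + "_" + l]] if w + "_" + l in keys else 0` (identical expression in Source A and Source B).
-- pyGetD's default 0 is never used under Pre_ (index in range).
def pvEmit (weight : List Int) (kd : PySem.Dict String Int) (w l : String) : Int :=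
  if kd.contains (w ++ "_" ++ l) then PySem.List.pyGetD weight (kd.getD (w ++ "_" ++ l) 0) 0 else 0

def viterbi_predict (weight : List Int) (sentence : List String) (labels : List String) (keys : List (String × Int)) : List String :=
  let kd := PySem.Dict.ofList keys
  -- path = dict((l, []) for l in labels)
  let path0 : PySem.Dict String (List String) :=
    labels.foldl (fun d l => d.insert l ([] : List String)) PySem.Dict.empty
  -- current_pro = {}; for l in labels: current_pro[l] = …
  let current0 : PySem.Dict String Int :=
    labels.foldl (fun d l => d.insert l (pvEmit weight kd (PySem.List.pyGetD sentence 0 "") l)) PySem.Dict.empty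
  -- for i in range(1, len(sentence)): …
  let st :=
    (PySem.List.pyRange 1 (PySem.List.len sentence) 1).foldl
      (fun (st : PySem.Dict String Int × PySem.Dict String (List String)) i =>
        labels.foldl
          (fun (st2 : PySem.Dict String Int × PySem.Dict String (List String)) l =>
            let pm := PySem.List.maxD
              (labels.map (fun la => (st.1.getD la 0 + pvEmit weight kd (PySem.List.pyGetD sentence i "") l, la)))
              (fun x => x.1) (0, "")
            (st2.1.insert l pm.1, st2.2.modify l [] (fun p => p ++ [pm.2])))
          ((PySem.Dict.empty : PySem.Dict String Int), st.2))
      (current0, path0)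
  -- max_pro = -1; max_path = None; for label in current_pro: …
  let fin :=
    st.1.keys.foldl
      (fun (acc : Int × Option (List String) × PySem.Dict String (List String)) label =>
        let path' := acc.2.2.modify label [] (fun q => q ++ [label])
        if acc.1 < st.1.getD label 0 then (st.1.getD label 0, some (path'.getD label []), path')
        else (acc.1, acc.2.1, path'))
      (-1, none, st.2)
  -- return max_path  (None, i.e. `.getD []`, is unreachable under Pre_)
  fin.2.1.getD []

-- ===== PORT B =====
def viterbi_predict_alt (weight : List Int) (sentence : List String) (labels : List String) (keys : List (String × Int)) : List String :=
  let kd := PySem.Dict.ofList keys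
  let current0 : PySem.Dict String Int :=
    labels.foldl (fun d l => d.insert l (pvEmit weight kd (PySem.List.pyGetD sentence 0 "") l)) PySem.Dict.empty
  let path0 : PySem.Dict String (List String) :=
    labels.foldl (fun d l => d.insert l ([] : List String)) PySem.Dict.empty
  -- for word in sentence[1:]: one argmax per step, then two O(L) loops
  let st :=
    (PySem.List.slice sentence (some 1) none).foldl
      (fun (st : PySem.Dict String Int × PySem.Dict String (List String)) word =>
        let best := PySem.List.maxD labels (fun la => st.1.getD la 0) ""
        let base := st.1.getD best 0
        let cur := labels.foldl (fun d l => d.insert l (base + pvEmit weight kd word l)) PySem.Dict.empty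
        let pth := labels.foldl (fun d l => d.modify l [] (fun p => p ++ [best])) st.2
        (cur, pth))
      (current0, path0)
  let best := PySem.List.maxD st.1.keys (fun l => st.1.getD l 0) ""
  st.2.getD best [] ++ [best]

-- ===== PRECONDITION & SPEC =====
-- running max of a list of ints starting from m (used by Pre_ below and by the proofs)
def pvMaxVal (m : Int) : List Int → Int
  | [] => m
  | x :: xs => pvMaxVal (if m < x then x else m) xs

-- best emission score of one word: max over labels of `weight[keys[w+"_"+l]] if … else 0`
-- (a direct read of the input data, no re-simulation of the algorithm's loop state)
def pvStepMax (weight : List Int) (keys : List (String × Int)) (labels : List String) (w : String) : Int :=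
  match labels with
  | [] => 0
  | l :: ls => pvMaxVal (pvEmit weight (PySem.Dict.ofList keys) w l)
      (ls.map (pvEmit weight (PySem.Dict.ofList keys) w))

-- Pre_ excludes exactly: empty sentence (IndexError) / empty labels (ValueError on max of []),
-- out-of-range weight indices for keys the algorithm can look up (IndexError), and the inputs
-- whose total best emission score is ≤ -1 — A's best final score equals that total, so there
-- A's `max_pro = -1` sentinel leaves max_path untouched and A returns None, not a list.
def Pre_viterbi_predict (weight : List Int) (sentence : List String) (labels : List String) (keys : List (String × Int)) : Prop :=
  sentence ≠ [] ∧ labels ≠ [] ∧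
  (∀ p ∈ keys, (∃ w ∈ sentence, ∃ l ∈ labels, p.1 = w ++ "_" ++ l) → PySem.Raise.InRange weight.length p.2) ∧
  -1 < (sentence.map (pvStepMax weight keys labels)).sum

instance (weight : List Int) (sentence : List String) (labels : List String) (keys : List (String × Int)) : Decidable (Pre_viterbi_predict weight sentence labels keys) := by
  unfold Pre_viterbi_predict PySem.Raise.InRange; infer_instance

def pvWitness_viterbi_predict : List Int × List String × List String × (List (String × Int)) :=
  ([], ["a"], ["x"], [])

def Spec_viterbi_predict (weight : List Int) (sentence : List String) (labels : List String) (keys : List (String × Int)) (out : List String) : Prop := out = viterbi_predict_alt weight sentence labels keys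
instance (weight : List Int) (sentence : List String) (labels : List String) (keys : List (String × Int)) (out : List String) : Decidable (Spec_viterbi_predict weight sentence labels keys out) := by unfold Spec_viterbi_predict; infer_instance

-- ===== CLAIM (what is proved, stated in full; the proofs are below) =====
def Claim_equal_viterbi_predict : Prop := ∀ (weight : List Int) (sentence : List String) (labels : List String) (keys : List (String × Int)), Dom_viterbi_predict weight sentence labels keys → Pre_viterbi_predict weight sentence labels keys → Spec_viterbi_predict weight sentence labels keys (viterbi_predict weight sentence labels keys)

-- ===== LEMMAS AND PROOFS =====

def pvMaxFrom {α : Type} (v : α → Int) (m : α) : List α → α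
  | [] => m
  | x :: xs => pvMaxFrom v (if v m < v x then x else m) xs

theorem pv_foldl_some {α : Type} (v : α → Int) (g : Option α → α → Option α)
    (hg : ∀ m x, g (some m) x = if v m < v x then some x else some m) :
    ∀ (ls : List α) (m : α), List.foldl g (some m) ls = some (pvMaxFrom v m ls) := by
  intro ls
  induction ls with
  | nil => intro m; simp [pvMaxFrom]
  | cons x xs ih =>
    intro m
    rw [List.foldl_cons, hg]
    by_cases h : v m < v x
    · simp only [if_pos h, pvMaxFrom, ih]
    · simp only [if_neg h, pvMaxFrom, ih]

theorem pv_max?_cons {α : Type} (v : α → Int) (x : α) (xs : List α) :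
    PySem.List.max? (x :: xs) v = some (pvMaxFrom v x xs) := by
  simp only [PySem.List.max?, List.foldl_cons]
  exact pv_foldl_some v _ (fun m y => rfl) xs x

theorem pv_maxD_cons {α : Type} (v : α → Int) (x : α) (xs : List α) (d : α) :
    PySem.List.maxD (x :: xs) v d = pvMaxFrom v x xs := by
  simp [PySem.List.maxD, pv_max?_cons]

theorem pv_maxFrom_mem {α : Type} (v : α → Int) :
    ∀ (xs : List α) (m : α), pvMaxFrom v m xs ∈ m :: xs := by
  intro xs
  induction xs with
  | nil => intro m; simp [pvMaxFrom]
  | cons x xs ih =>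
    intro m
    by_cases h : v m < v x
    · simp only [pvMaxFrom, if_pos h]
      exact List.mem_cons_of_mem _ (ih x)
    · simp only [pvMaxFrom, if_neg h]
      rcases List.mem_cons.mp (ih m) with h' | h'
      · rw [h']; exact List.mem_cons_self
      · exact List.mem_cons_of_mem _ (List.mem_cons_of_mem _ h')

theorem pv_maxFrom_val {α : Type} (v : α → Int) :
    ∀ (xs : List α) (m : α), v (pvMaxFrom v m xs) = pvMaxVal (v m) (xs.map v) := by
  intro xs
  induction xs with
  | nil => intro m; simp [pvMaxFrom, pvMaxVal]
  | cons x xs ih =>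
    intro m
    by_cases h : v m < v x
    · simp only [pvMaxFrom, List.map_cons, pvMaxVal, if_pos h, ih]
    · simp only [pvMaxFrom, List.map_cons, pvMaxVal, if_neg h, ih]

theorem pv_maxVal_shift (f : String → Int) (c : Int) :
    ∀ (xs : List String) (a : Int),
      pvMaxVal (c + a) (xs.map (fun x => c + f x)) = c + pvMaxVal a (xs.map f) := by
  intro xs
  induction xs with
  | nil => intro a; simp [pvMaxVal]
  | cons x xs ih =>
    intro a
    by_cases h : a < f x
    · have h' : c + a < c + f x := by omega
      simp only [List.map_cons, pvMaxVal, if_pos h, if_pos h', ih]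
    · have h' : ¬ (c + a < c + f x) := by omega
      simp only [List.map_cons, pvMaxVal, if_neg h, if_neg h', ih]

theorem pv_maxFrom_shift (f : String → Int) (c : Int) :
    ∀ (xs : List String) (m : String),
      pvMaxFrom (fun x : Int × String => x.1) (f m + c, m) (xs.map (fun la => (f la + c, la)))
        = (f (pvMaxFrom f m xs) + c, pvMaxFrom f m xs) := by
  intro xs
  induction xs with
  | nil => intro m; simp [pvMaxFrom]
  | cons x xs ih =>
    intro m
    by_cases h : f m < f x
    · have h' : f m + c < f x + c := by omega
      simp only [List.map_cons, pvMaxFrom, if_pos h, if_pos h']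
      exact ih x
    · have h' : ¬ (f m + c < f x + c) := by omega
      simp only [List.map_cons, pvMaxFrom, if_neg h, if_neg h']
      exact ih m

theorem pv_maxFrom_skip (v : String → Int) :
    ∀ (t : List String) (h k : String), (∃ m ∈ h :: t, v k < v m) →
      pvMaxFrom v k (h :: t) = pvMaxFrom v h t := by
  intro t
  induction t with
  | nil =>
    intro h k ⟨m, hm, hv⟩
    simp only [List.mem_cons, List.not_mem_nil, or_false] at hm
    subst hm
    simp [pvMaxFrom, hv]
  | cons h2 t2 ih =>
    intro h k ⟨m, hm, hv⟩
    by_cases hk : v k < v h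
    · simp [pvMaxFrom, hk]
    · have hm' : m ∈ h2 :: t2 := by
        rcases List.mem_cons.mp hm with rfl | h'
        · omega
        · exact h'
      have l1 : pvMaxFrom v k (h :: h2 :: t2) = pvMaxFrom v k (h2 :: t2) := by
        simp [pvMaxFrom, hk]
      have l2 := ih h2 k ⟨m, hm', hv⟩
      have l3 := ih h2 h ⟨m, hm', by omega⟩
      rw [l1, l2, l3]

-- ==== selection (A's -1-sentinel final scan) ====
def pvSel (v : String → Int) (P : String → List String) :
    (Int × Option (List String)) → String → (Int × Option (List String)) :=
  fun acc k => if acc.1 < v k then (v k, some (P k)) else acc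

theorem pv_sel_run (v : String → Int) (P : String → List String) :
    ∀ (ks : List String) (m : String),
      ks.foldl (pvSel v P) (v m, some (P m)) = (v (pvMaxFrom v m ks), some (P (pvMaxFrom v m ks))) := by
  intro ks
  induction ks with
  | nil => intro m; simp [pvMaxFrom]
  | cons k ks ih =>
    intro m
    by_cases h : v m < v k
    · simp only [List.foldl_cons, pvSel, if_pos h, pvMaxFrom, ih k]
    · simp only [List.foldl_cons, pvSel, if_neg h, pvMaxFrom, ih m]

theorem pv_sel_start (v : String → Int) (P : String → List String) :
    ∀ (ks : List String), (∃ k ∈ ks, -1 < v k) →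
      ∃ M, PySem.List.max? ks v = some M ∧
        ks.foldl (pvSel v P) (-1, none) = (v M, some (P M)) := by
  intro ks
  induction ks with
  | nil => rintro ⟨k, hk, -⟩; exact absurd hk (List.not_mem_nil)
  | cons k ks ih =>
    rintro ⟨m, hm, hv⟩
    by_cases hk : -1 < v k
    · refine ⟨pvMaxFrom v k ks, pv_max?_cons v k ks, ?_⟩
      simp only [List.foldl_cons, pvSel, if_pos (show (-1 : Int) < v k from hk)]
      exact pv_sel_run v P ks k
    · have hm' : m ∈ ks := by
        rcases List.mem_cons.mp hm with rfl | h'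
        · omega
        · exact h'
      rcases ks with _ | ⟨h, t⟩
      · exact absurd hm' (List.not_mem_nil)
      · obtain ⟨M, hmax, hfold⟩ := ih ⟨m, hm', hv⟩
        refine ⟨M, ?_, ?_⟩
        · rw [pv_max?_cons, pv_maxFrom_skip v t h k ⟨m, hm', by omega⟩]
          rw [pv_max?_cons] at hmax
          exact hmax
        · simpa only [List.foldl_cons, pvSel, if_neg hk] using hfold

-- ==== A's final loop: threading the path dict reduces to pvSel ====
theorem pv_final_thread (cur : PySem.Dict String Int) :
    ∀ (ks : List String), ks.Nodup →
      ∀ (p : PySem.Dict String (List String)) (a1 : Int) (a2 : Option (List String)),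
      (ks.foldl (fun (acc : Int × Option (List String) × PySem.Dict String (List String)) label =>
          let path' := acc.2.2.modify label [] (fun q => q ++ [label])
          if acc.1 < cur.getD label 0 then (cur.getD label 0, some (path'.getD label []), path')
          else (acc.1, acc.2.1, path'))
        (a1, a2, p)).2.1
      = (ks.foldl (pvSel (fun k => cur.getD k 0) (fun k => p.getD k [] ++ [k])) (a1, a2)).2 := by
  intro ks
  induction ks with
  | nil => intro _ p a1 a2; rfl
  | cons k ks ih =>
    intro hnd p a1 a2
    have hk : k ∉ ks := (List.nodup_cons.mp hnd).1
    have hnd' : ks.Nodup := (List.nodup_cons.mp hnd).2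
    have hself : (p.modify k [] (fun q => q ++ [k])).getD k [] = p.getD k [] ++ [k] :=
      PySem.Dict.getD_modify_self p k [] _
    have hcong : ∀ (acc : Int × Option (List String)) (x : String), x ∈ ks →
        pvSel (fun k' => cur.getD k' 0) (fun k' => (p.modify k [] (fun q => q ++ [k])).getD k' [] ++ [k']) acc x
        = pvSel (fun k' => cur.getD k' 0) (fun k' => p.getD k' [] ++ [k']) acc x := by
      intro acc x hx
      have hne : x ≠ k := fun h => hk (h ▸ hx)
      simp only [pvSel, PySem.Dict.getD_modify_of_ne p [] _ hne]
    by_cases hc : a1 < cur.getD k 0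
    · simp only [List.foldl_cons, if_pos hc, hself]
      have hrec := ih hnd' (p.modify k [] (fun q => q ++ [k])) (cur.getD k 0) (some (p.getD k [] ++ [k]))
      rw [hrec, PySem.List.foldl_congr_mem ks _ _ _ hcong]
      simp only [pvSel, if_pos hc]
    · simp only [List.foldl_cons, if_neg hc]
      have hrec := ih hnd' (p.modify k [] (fun q => q ++ [k])) a1 a2
      rw [hrec, PySem.List.foldl_congr_mem ks _ _ _ hcong]
      simp only [pvSel, if_neg hc]

-- ==== dict insert-fold lookups ====
theorem pv_getD_insfold_not_mem {ν : Type} (F : String → ν) (c : ν) :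
    ∀ (ls : List String) (d : PySem.Dict String ν) (l0 : String), l0 ∉ ls →
      (ls.foldl (fun d l => d.insert l (F l)) d).getD l0 c = d.getD l0 c := by
  intro ls
  induction ls with
  | nil => intro d l0 _; rfl
  | cons x xs ih =>
    intro d l0 h
    rw [List.foldl_cons, ih _ _ (fun hx => h (List.mem_cons_of_mem _ hx)),
      PySem.Dict.getD_insert_of_ne _ _ _ (fun he => h (by rw [he]; exact List.mem_cons_self))]

theorem pv_getD_insfold_mem {ν : Type} (F : String → ν) (c : ν) :
    ∀ (ls : List String) (d : PySem.Dict String ν) (l0 : String), l0 ∈ ls →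
      (ls.foldl (fun d l => d.insert l (F l)) d).getD l0 c = F l0 := by
  intro ls
  induction ls with
  | nil => intro d l0 h; exact absurd h (List.not_mem_nil)
  | cons x xs ih =>
    intro d l0 h
    by_cases hx : l0 ∈ xs
    · rw [List.foldl_cons, ih _ _ hx]
    · have : l0 = x := by rcases List.mem_cons.mp h with h | h; exact h; exact absurd h hx
      subst this
      rw [List.foldl_cons, pv_getD_insfold_not_mem F c xs _ _ hx, PySem.Dict.getD_insert_self]

-- ==== the two step functions, and their equality ====
def pvStepA (E : String → String → Int) (labels : List String) :
    (PySem.Dict String Int × PySem.Dict String (List String)) → String →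
    (PySem.Dict String Int × PySem.Dict String (List String)) :=
  fun st w =>
    labels.foldl
      (fun st2 l =>
        let pm := PySem.List.maxD
          (labels.map (fun la => (st.1.getD la 0 + E w l, la))) (fun x => x.1) (0, "")
        (st2.1.insert l pm.1, st2.2.modify l [] (fun p => p ++ [pm.2])))
      (PySem.Dict.empty, st.2)

def pvStepB (E : String → String → Int) (labels : List String) :
    (PySem.Dict String Int × PySem.Dict String (List String)) → String →
    (PySem.Dict String Int × PySem.Dict String (List String)) :=
  fun st w =>
    let best := PySem.List.maxD labels (fun la => st.1.getD la 0) ""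
    let base := st.1.getD best 0
    (labels.foldl (fun d l => d.insert l (base + E w l)) PySem.Dict.empty,
     labels.foldl (fun d l => d.modify l [] (fun p => p ++ [best])) st.2)

theorem pv_step_eq (E : String → String → Int) (labels : List String) (hl : labels ≠ [])
    (st : PySem.Dict String Int × PySem.Dict String (List String)) (w : String) :
    pvStepA E labels st w = pvStepB E labels st w := by
  rcases labels with _ | ⟨l1, ls⟩
  · exact absurd rfl hl
  have hbest : PySem.List.maxD (l1 :: ls) (fun la => st.1.getD la 0) ""
      = pvMaxFrom (fun la => st.1.getD la 0) l1 ls := pv_maxD_cons _ l1 ls ""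
  set f : String → Int := fun la => st.1.getD la 0 with hf
  set best := pvMaxFrom f l1 ls with hbdef
  have hpm : ∀ l : String,
      PySem.List.maxD ((l1 :: ls).map (fun la => (st.1.getD la 0 + E w l, la))) (fun x => x.1) (0, "")
        = (st.1.getD best 0 + E w l, best) := by
    intro l
    rw [List.map_cons, pv_maxD_cons, pv_maxFrom_shift f (E w l) ls l1]
  have hfun : (fun (st2 : PySem.Dict String Int × PySem.Dict String (List String)) (l : String) =>
        let pm := PySem.List.maxD
          ((l1 :: ls).map (fun la => (st.1.getD la 0 + E w l, la))) (fun x => x.1) (0, "")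
        (st2.1.insert l pm.1, st2.2.modify l [] (fun p => p ++ [pm.2])))
      = (fun st2 l =>
        (st2.1.insert l (st.1.getD best 0 + E w l), st2.2.modify l [] (fun p => p ++ [best]))) := by
    funext st2 l
    simp only [hpm l]
  show (l1 :: ls).foldl _ (PySem.Dict.empty, st.2) = _
  rw [hfun, PySem.List.foldl_prod_mk
    (f := fun (d : PySem.Dict String Int) (l : String) => d.insert l (st.1.getD best 0 + E w l))
    (g := fun (d : PySem.Dict String (List String)) (l : String) => d.modify l [] (fun p => p ++ [best]))]
  have hb2 : PySem.List.maxD (l1 :: ls) (fun la => st.1.getD la 0) "" = best := hbest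
  simp only [pvStepB]
  rw [hb2]

-- ==== score invariant: the best current score is the running sum of per-word best emissions ====
theorem pv_step_score (E : String → String → Int) (l1 : String) (ls : List String)
    (st : PySem.Dict String Int × PySem.Dict String (List String)) (w : String) :
    pvMaxVal ((pvStepB E (l1 :: ls) st w).1.getD l1 0)
        (ls.map (fun l => (pvStepB E (l1 :: ls) st w).1.getD l 0))
      = pvMaxVal (st.1.getD l1 0) (ls.map (fun l => st.1.getD l 0))
          + pvMaxVal (E w l1) (ls.map (E w)) := by
  have hbase : (pvStepB E (l1 :: ls) st w).1
      = (l1 :: ls).foldl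
          (fun d l => d.insert l (st.1.getD (PySem.List.maxD (l1 :: ls) (fun la => st.1.getD la 0) "") 0 + E w l))
          PySem.Dict.empty := rfl
  set base := st.1.getD (PySem.List.maxD (l1 :: ls) (fun la => st.1.getD la 0) "") 0 with hbasedef
  have hget : ∀ l ∈ (l1 :: ls), (pvStepB E (l1 :: ls) st w).1.getD l 0 = base + E w l := by
    intro l hl
    rw [hbase]
    exact pv_getD_insfold_mem _ _ _ _ _ hl
  have h1 : (pvStepB E (l1 :: ls) st w).1.getD l1 0 = base + E w l1 :=
    hget l1 List.mem_cons_self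
  have h2 : ls.map (fun l => (pvStepB E (l1 :: ls) st w).1.getD l 0)
      = ls.map (fun l => base + E w l) :=
    List.map_congr_left (fun l hl => hget l (List.mem_cons_of_mem _ hl))
  rw [h1, h2, pv_maxVal_shift (E w) base ls (E w l1)]
  have hv := pv_maxFrom_val (fun la => st.1.getD la 0) ls l1
  simp only at hv
  have hbval : base = pvMaxVal (st.1.getD l1 0) (ls.map (fun l => st.1.getD l 0)) := by
    rw [hbasedef, pv_maxD_cons]; exact hv
  rw [hbval]

theorem pv_invariant (E : String → String → Int) (l1 : String) (ls : List String) :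
    ∀ (ws : List String) (st : PySem.Dict String Int × PySem.Dict String (List String)),
      st.1.keys = PySem.Set.ofList (l1 :: ls) →
      (ws.foldl (pvStepB E (l1 :: ls)) st).1.keys = PySem.Set.ofList (l1 :: ls) ∧
        pvMaxVal ((ws.foldl (pvStepB E (l1 :: ls)) st).1.getD l1 0)
          (ls.map (fun l => (ws.foldl (pvStepB E (l1 :: ls)) st).1.getD l 0))
        = pvMaxVal (st.1.getD l1 0) (ls.map (fun l => st.1.getD l 0))
            + (ws.map (fun w => pvMaxVal (E w l1) (ls.map (E w)))).sum := by
  intro ws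
  induction ws with
  | nil => intro st h1; exact ⟨h1, by simp⟩
  | cons w ws ih =>
    intro st h1
    have hkeys : (pvStepB E (l1 :: ls) st w).1.keys = PySem.Set.ofList (l1 :: ls) := by
      simp only [pvStepB]
      rw [PySem.Dict.keys_foldl_insert (l1 :: ls) _ PySem.Dict.empty, PySem.Dict.keys_empty,
        PySem.Set.update_nil_left]
    obtain ⟨ih1, ih2⟩ := ih (pvStepB E (l1 :: ls) st w) hkeys
    refine ⟨by simpa using ih1, ?_⟩
    rw [List.foldl_cons]
    rw [ih2, pv_step_score E l1 ls st w]
    simp only [List.map_cons, List.sum_cons]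
    ring

-- ==== unfolded forms of the two ports ====
def pvInitCur (weight : List Int) (sentence : List String) (labels : List String) (keys : List (String × Int)) : PySem.Dict String Int :=
  labels.foldl (fun d l => d.insert l (pvEmit weight (PySem.Dict.ofList keys) (PySem.List.pyGetD sentence 0 "") l)) PySem.Dict.empty

def pvInitPath (labels : List String) : PySem.Dict String (List String) :=
  labels.foldl (fun d l => d.insert l ([] : List String)) PySem.Dict.empty

def pvFinalA (cur : PySem.Dict String Int) (p : PySem.Dict String (List String)) : List String :=
  (cur.keys.foldl
    (fun (acc : Int × Option (List String) × PySem.Dict String (List String)) label =>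
      let path' := acc.2.2.modify label [] (fun q => q ++ [label])
      if acc.1 < cur.getD label 0 then (cur.getD label 0, some (path'.getD label []), path')
      else (acc.1, acc.2.1, path'))
    (-1, none, p)).2.1.getD []

def pvFinalB (cur : PySem.Dict String Int) (p : PySem.Dict String (List String)) : List String :=
  (p.getD (PySem.List.maxD cur.keys (fun l => cur.getD l 0) "") []) ++
    [PySem.List.maxD cur.keys (fun l => cur.getD l 0) ""]

theorem pvA_eq (weight : List Int) (sentence : List String) (labels : List String) (keys : List (String × Int)) :
    viterbi_predict weight sentence labels keys =
      pvFinalA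
        ((PySem.List.pyRange 1 (PySem.List.len sentence) 1).foldl
          (fun st i => pvStepA (pvEmit weight (PySem.Dict.ofList keys)) labels st (PySem.List.pyGetD sentence i ""))
          (pvInitCur weight sentence labels keys, pvInitPath labels)).1
        ((PySem.List.pyRange 1 (PySem.List.len sentence) 1).foldl
          (fun st i => pvStepA (pvEmit weight (PySem.Dict.ofList keys)) labels st (PySem.List.pyGetD sentence i ""))
          (pvInitCur weight sentence labels keys, pvInitPath labels)).2 := rfl

theorem pvB_eq (weight : List Int) (sentence : List String) (labels : List String) (keys : List (String × Int)) :
    viterbi_predict_alt weight sentence labels keys =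
      pvFinalB
        ((PySem.List.slice sentence (some 1) none).foldl
          (pvStepB (pvEmit weight (PySem.Dict.ofList keys)) labels)
          (pvInitCur weight sentence labels keys, pvInitPath labels)).1
        ((PySem.List.slice sentence (some 1) none).foldl
          (pvStepB (pvEmit weight (PySem.Dict.ofList keys)) labels)
          (pvInitCur weight sentence labels keys, pvInitPath labels)).2 := rfl

-- ==== main assembly ====
theorem pv_main (weight : List Int) (sentence : List String) (labels : List String) (keys : List (String × Int))
    (hs : sentence ≠ []) (hl : labels ≠ [])
    (hsum : -1 < (sentence.map (pvStepMax weight keys labels)).sum) :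
    viterbi_predict weight sentence labels keys = viterbi_predict_alt weight sentence labels keys := by
  rw [pvA_eq, pvB_eq]
  have hstep : pvStepA (pvEmit weight (PySem.Dict.ofList keys)) labels
      = pvStepB (pvEmit weight (PySem.Dict.ofList keys)) labels :=
    funext fun st => funext fun w => pv_step_eq _ _ hl st w
  rw [hstep, PySem.List.foldl_pyRange_pyGetD sentence ""
      (pvStepB (pvEmit weight (PySem.Dict.ofList keys)) labels)
      (pvInitCur weight sentence labels keys, pvInitPath labels) (by norm_num : (0:Int) ≤ 1),
    PySem.List.slice_from_one, ← List.drop_one]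
  have ht1 : (1 : Int).toNat = 1 := rfl
  rw [ht1]
  set R := (sentence.drop 1).foldl (pvStepB (pvEmit weight (PySem.Dict.ofList keys)) labels)
      (pvInitCur weight sentence labels keys, pvInitPath labels) with hR
  rcases labels with _ | ⟨l1, ls⟩
  · exact absurd rfl hl
  rcases sentence with _ | ⟨w1, rest⟩
  · exact absurd rfl hs
  have hw0 : PySem.List.pyGetD (w1 :: rest) (0 : Int) "" = w1 := by
    simp [PySem.List.pyGetD, PySem.List.pyGet?, PySem.List.pyIdx?]
  have hinit_keys : (pvInitCur weight (w1 :: rest) (l1 :: ls) keys).keys = PySem.Set.ofList (l1 :: ls) := by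
    unfold pvInitCur
    rw [PySem.Dict.keys_foldl_insert (l1 :: ls) _ PySem.Dict.empty, PySem.Dict.keys_empty,
      PySem.Set.update_nil_left]
  have hinit_val : ∀ l ∈ (l1 :: ls),
      (pvInitCur weight (w1 :: rest) (l1 :: ls) keys).getD l 0
        = pvEmit weight (PySem.Dict.ofList keys) w1 l := by
    intro l hl'
    unfold pvInitCur
    rw [pv_getD_insfold_mem _ _ _ _ _ hl', hw0]
  obtain ⟨hkeys, hval⟩ := pv_invariant (pvEmit weight (PySem.Dict.ofList keys)) l1 ls
    ((w1 :: rest).drop 1) (pvInitCur weight (w1 :: rest) (l1 :: ls) keys, pvInitPath (l1 :: ls))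
    hinit_keys
  rw [← hR] at hkeys hval
  -- the best final score equals the Pre_ sum
  have hfn : pvStepMax weight keys (l1 :: ls)
      = (fun w => pvMaxVal (pvEmit weight (PySem.Dict.ofList keys) w l1)
          (ls.map (pvEmit weight (PySem.Dict.ofList keys) w))) :=
    funext fun w => by simp [pvStepMax]
  have hMV : pvMaxVal (R.1.getD l1 0) (ls.map (fun l => R.1.getD l 0))
      = ((w1 :: rest).map (pvStepMax weight keys (l1 :: ls))).sum := by
    rw [hval, hinit_val l1 List.mem_cons_self,
      List.map_congr_left (fun l hl' => hinit_val l (List.mem_cons_of_mem _ hl')), hfn]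
    simp only [List.map_cons, List.sum_cons, List.drop_one, List.tail_cons]
  -- a key of R.1 whose score beats the -1 sentinel
  have hbig : ∃ k ∈ R.1.keys, -1 < R.1.getD k 0 := by
    refine ⟨pvMaxFrom (fun l => R.1.getD l 0) l1 ls, ?_, ?_⟩
    · rw [hkeys]
      exact (PySem.Set.mem_ofList _ _).mpr (pv_maxFrom_mem (fun l => R.1.getD l 0) ls l1)
    · show (-1 : Int) < R.1.getD (pvMaxFrom (fun l => R.1.getD l 0) l1 ls) 0
      have := pv_maxFrom_val (fun l => R.1.getD l 0) ls l1
      simp only at this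
      rw [this, hMV]
      exact hsum
  have hnd : R.1.keys.Nodup := by rw [hkeys]; exact PySem.Set.nodup_ofList _
  unfold pvFinalA pvFinalB
  rw [pv_final_thread R.1 R.1.keys hnd R.2 (-1) none]
  obtain ⟨M, hmax, hfold⟩ := pv_sel_start (fun k => R.1.getD k 0) (fun k => R.2.getD k [] ++ [k])
    R.1.keys hbig
  rw [hfold]
  have hbest : PySem.List.maxD R.1.keys (fun l => R.1.getD l 0) "" = M := by
    simp [PySem.List.maxD, hmax]
  rw [hbest]
  rfl

-- ===== VERDICT (by name: the statement is the Claim_ definition above) =====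
theorem viterbi_predict_spec : Claim_equal_viterbi_predict := by
  intro weight sentence labels keys _hdom hpre
  obtain ⟨hs, hl, _hrange, hsum⟩ := hpre
  unfold Spec_viterbi_predict
  exact pv_main weight sentence labels keys hs hl hsum
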